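-- pv_equiv track=rewrite | github.com/Feeenix/advent-of-code-2024 | day 22/day 22 part 2.py | evolve_get_bananas
-- ===== SOURCE A (Python) =====
-- def evolve_get_bananas(secret,n):
--     prev1v = 0
--     prev2v = 0
--     prev3v = 0
--     prev_this = secret%10
--     theset = {}
--     for i in range(n):
--         secret = ((secret<<6)^secret)&(2**24-1)
--         secret = ((secret>>5)^secret)#&(2**24-1)
--         secret = ((secret<<11)^secret)&(2**24-1)
--         this = secret%10
--         v = this - prev_this
--         prev_this = this
--         if i >= 3:
--             if (v,prev1v,prev2v,prev3v) not in theset: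
--                 theset[(v,prev1v,prev2v,prev3v)] = this
--         prev3v = prev2v
--         prev2v = prev1v
--         prev1v = v
--     return theset
-- ===== SOURCE B (Python) =====
-- def evolve_get_bananas(secret, n):
--     # Build the full price series, then window the deltas; first-seen key wins via setdefault.
--     prices = [secret % 10]
--     s = secret
--     for _ in range(n):
--         s = ((s << 6) ^ s) & 0xFFFFFF
--         s = (s >> 5) ^ s
--         s = ((s << 11) ^ s) & 0xFFFFFF
--         prices.append(s % 10)
--     deltas = [b - a for a, b in zip(prices, prices[1:])]
--     res = {}
--     for i in range(3, len(deltas)):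
--         res.setdefault((deltas[i], deltas[i-1], deltas[i-2], deltas[i-3]), prices[i+1])
--     return res
-- ===== Notes on version B (the rewrite author's own statement) =====
-- stated objective: simpler
-- what changed: A's single loop with five rolling state variables (prev1v/prev2v/prev3v/prev_this plus the in-loop dict update) is replaced by a three-stage pipeline: build the full price list, derive the delta list by zipping it with its own tail, then window four consecutive deltas with dict.setdefault for first-seen-wins insertion.
import Mathlib
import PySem

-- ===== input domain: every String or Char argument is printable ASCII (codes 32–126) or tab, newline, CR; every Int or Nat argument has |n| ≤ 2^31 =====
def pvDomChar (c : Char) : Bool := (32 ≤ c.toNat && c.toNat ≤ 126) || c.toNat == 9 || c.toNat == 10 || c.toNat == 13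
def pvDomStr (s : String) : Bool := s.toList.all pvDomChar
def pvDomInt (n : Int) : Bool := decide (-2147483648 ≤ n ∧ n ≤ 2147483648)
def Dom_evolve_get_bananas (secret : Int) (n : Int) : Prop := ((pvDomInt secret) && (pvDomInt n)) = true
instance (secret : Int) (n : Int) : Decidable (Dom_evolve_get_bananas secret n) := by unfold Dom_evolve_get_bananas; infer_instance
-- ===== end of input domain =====

-- B rebuilds the answer as precompute-prices / window-deltas / setdefault instead of A's single rolling-state loop (objective: simpler decomposition).
-- The dict of 4-tuple keys to Int values is flattened to 5-tuples (key.1, key.2, key.3, key.4, value), insertion order kept, first insertion wins.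

-- membership test for a 4-tuple key in the flattened dict (A's `key not in theset`, and inside B's `setdefault`)
def pvHasKey (d : List (Int × Int × Int × Int × Int)) (k : Int × Int × Int × Int) : Bool :=
  d.any (fun e => decide ((e.1, e.2.1, e.2.2.1, e.2.2.2.1) = k))

-- ===== PORT A =====
-- A's loop: rolling state (secret, prev1v, prev2v, prev3v, prev_this, theset), i the Python loop index, fuel = remaining iterations
def pvLoopA (s p1 p2 p3 prev : Int) (d : List (Int × Int × Int × Int × Int)) (i : Nat) :
    Nat → List (Int × Int × Int × Int × Int)
  | 0 => d
  | k+1 =>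
    let s1 := PySem.Int.band (PySem.Int.bxor (s <<< (6 : Nat)) s) 16777215
    let s2 := PySem.Int.bxor (s1 >>> (5 : Nat)) s1            -- the un-masked middle step, as in A
    let s3 := PySem.Int.band (PySem.Int.bxor (s2 <<< (11 : Nat)) s2) 16777215
    let this := PySem.Int.mod s3 10
    let v := this - prev
    let d' := if 3 ≤ i then (if pvHasKey d (v, p1, p2, p3) then d else d ++ [(v, p1, p2, p3, this)]) else d
    pvLoopA s3 v p1 p2 this d' (i + 1) k

def evolve_get_bananas (secret : Int) (n : Int) : List (Int × Int × Int × Int × Int) :=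
  pvLoopA secret 0 0 0 (PySem.Int.mod secret 10) [] 0 n.toNat   -- range(n) runs max(n,0) times

-- ===== PORT B =====
-- B's first loop: append s%10 after each transform, fuel = remaining iterations
def pvBuildPricesB (s : Int) (acc : List Int) : Nat → List Int
  | 0 => acc
  | k+1 =>
    let s1 := PySem.Int.band (PySem.Int.bxor (s <<< (6 : Nat)) s) 16777215
    let s2 := PySem.Int.bxor (s1 >>> (5 : Nat)) s1
    let s3 := PySem.Int.band (PySem.Int.bxor (s2 <<< (11 : Nat)) s2) 16777215
    pvBuildPricesB s3 (acc ++ [PySem.Int.mod s3 10]) k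

-- dict.setdefault(key, v) on the flattened dict: insert only if the key is absent
def pvSetdefaultB (d : List (Int × Int × Int × Int × Int)) (k : Int × Int × Int × Int) (v : Int) :
    List (Int × Int × Int × Int × Int) :=
  if pvHasKey d k then d else d ++ [(k.1, k.2.1, k.2.2.1, k.2.2.2, v)]

def evolve_get_bananas_alt (secret : Int) (n : Int) : List (Int × Int × Int × Int × Int) :=
  let prices := pvBuildPricesB secret [PySem.Int.mod secret 10] n.toNat
  let deltas := List.zipWith (fun a b => b - a) prices (PySem.List.slice prices (some 1) none)  -- zip(prices, prices[1:])
  (PySem.List.pyRange 3 (PySem.List.len deltas) 1).foldl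
    (fun res i =>
      pvSetdefaultB res
        (PySem.List.pyGetD deltas i 0, PySem.List.pyGetD deltas (i - 1) 0,
         PySem.List.pyGetD deltas (i - 2) 0, PySem.List.pyGetD deltas (i - 3) 0)
        (PySem.List.pyGetD prices (i + 1) 0))   -- indices are always in range for i in range(3, len(deltas))
    []

-- ===== PRECONDITION & SPEC =====
def Spec_evolve_get_bananas (secret : Int) (n : Int) (out : List (Int × Int × Int × Int × Int)) : Prop := out = evolve_get_bananas_alt secret n
instance (secret : Int) (n : Int) (out : List (Int × Int × Int × Int × Int)) : Decidable (Spec_evolve_get_bananas secret n out) := by unfold Spec_evolve_get_bananas; infer_instance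

-- ===== CLAIM (what is proved, stated in full; the proofs are below) =====
def Claim_equal_evolve_get_bananas : Prop := ∀ (secret : Int) (n : Int), Dom_evolve_get_bananas secret n → Spec_evolve_get_bananas secret n (evolve_get_bananas secret n)

-- ===== LEMMAS AND PROOFS =====

-- the secret transform, the secret/price/delta series as functions of the step index
def pvStep (s : Int) : Int :=
  let s1 := PySem.Int.band (PySem.Int.bxor (s <<< (6 : Nat)) s) 16777215
  let s2 := PySem.Int.bxor (s1 >>> (5 : Nat)) s1
  PySem.Int.band (PySem.Int.bxor (s2 <<< (11 : Nat)) s2) 16777215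

def pvS (secret : Int) : Nat → Int
  | 0 => secret
  | k+1 => pvStep (pvS secret k)

def pvP (secret : Int) (k : Nat) : Int := PySem.Int.mod (pvS secret k) 10
def pvD (secret : Int) (k : Nat) : Int := pvP secret (k + 1) - pvP secret k

-- the common normal form: fold of setdefault-inserts over indices i, i+1, …, i+k-1
def pvFoldIns (secret : Int) (d : List (Int × Int × Int × Int × Int)) (i : Nat) :
    Nat → List (Int × Int × Int × Int × Int)
  | 0 => d
  | k+1 => pvFoldIns secret
      (pvSetdefaultB d (pvD secret i, pvD secret (i - 1), pvD secret (i - 2), pvD secret (i - 3)) (pvP secret (i + 1)))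
      (i + 1) k

theorem pvLoopA_inv (secret : Int) : ∀ (k i : Nat) (d : List (Int × Int × Int × Int × Int)), 3 ≤ i →
    pvLoopA (pvS secret i) (pvD secret (i - 1)) (pvD secret (i - 2)) (pvD secret (i - 3)) (pvP secret i) d i k
      = pvFoldIns secret d i k := by
  intro k
  induction k with
  | zero => intro i d hi; simp [pvLoopA, pvFoldIns]
  | succ k ih =>
    intro i d hi
    show pvLoopA _ _ _ _ _ _ _ (k+1) = _
    rw [pvLoopA]
    have hstep : PySem.Int.band (PySem.Int.bxor
        ((PySem.Int.bxor ((PySem.Int.band (PySem.Int.bxor ((pvS secret i) <<< (6:Nat)) (pvS secret i)) 16777215) >>> (5:Nat))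
          (PySem.Int.band (PySem.Int.bxor ((pvS secret i) <<< (6:Nat)) (pvS secret i)) 16777215)) <<< (11:Nat))
        (PySem.Int.bxor ((PySem.Int.band (PySem.Int.bxor ((pvS secret i) <<< (6:Nat)) (pvS secret i)) 16777215) >>> (5:Nat))
          (PySem.Int.band (PySem.Int.bxor ((pvS secret i) <<< (6:Nat)) (pvS secret i)) 16777215))) 16777215
        = pvS secret (i+1) := rfl
    simp only [hstep]
    have hvd : PySem.Int.mod (pvS secret (i+1)) 10 - pvP secret i = pvD secret i := by
      simp [pvD, pvP]
    rw [pvFoldIns]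
    have h3 : (3 ≤ i) = True := by simp [hi]
    simp only [hvd, h3, if_true]
    have e1 : i + 1 - 1 = i := by omega
    have e2 : i + 1 - 2 = i - 1 := by omega
    have e3 : i + 1 - 3 = i - 2 := by omega
    have := ih (i+1) (pvSetdefaultB d (pvD secret i, pvD secret (i - 1), pvD secret (i - 2), pvD secret (i - 3)) (pvP secret (i + 1))) (by omega)
    rw [e1, e2, e3] at this
    rw [← this]
    simp [pvSetdefaultB, pvP]


theorem pvLoopA_first3 (secret : Int) (k : Nat) :
    pvLoopA secret 0 0 0 (PySem.Int.mod secret 10) [] 0 (k + 3)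
      = pvLoopA (pvS secret 3) (pvD secret 2) (pvD secret 1) (pvD secret 0) (pvP secret 3) [] 3 k := by
  show pvLoopA secret 0 0 0 (PySem.Int.mod secret 10) [] 0 ((k + 2) + 1) = _
  rw [pvLoopA]
  show pvLoopA _ _ _ _ _ _ _ ((k + 1) + 1) = _
  rw [pvLoopA]
  show pvLoopA _ _ _ _ _ _ _ (k + 1) = _
  rw [pvLoopA]
  simp only [show ¬ (3 ≤ 0) by omega, show ¬ (3 ≤ 1) by omega, show ¬ (3 ≤ 2) by omega, if_false]
  norm_num
  congr 1 <;> simp [pvS, pvStep, pvP, pvD]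

theorem pvLoopA_small (secret : Int) (m : Nat) (hm : m ≤ 3) :
    pvLoopA secret 0 0 0 (PySem.Int.mod secret 10) [] 0 m = [] := by
  interval_cases m <;> simp [pvLoopA]


theorem pvBuildPricesB_spec (secret : Int) : ∀ (k i : Nat) (acc : List Int),
    pvBuildPricesB (pvS secret i) acc k = acc ++ (List.range k).map (fun j => pvP secret (i + 1 + j)) := by
  intro k
  induction k with
  | zero => intro i acc; simp [pvBuildPricesB]
  | succ k ih =>
    intro i acc
    rw [pvBuildPricesB]
    have hstep : PySem.Int.band (PySem.Int.bxor
        ((PySem.Int.bxor ((PySem.Int.band (PySem.Int.bxor ((pvS secret i) <<< (6:Nat)) (pvS secret i)) 16777215) >>> (5:Nat))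
          (PySem.Int.band (PySem.Int.bxor ((pvS secret i) <<< (6:Nat)) (pvS secret i)) 16777215)) <<< (11:Nat))
        (PySem.Int.bxor ((PySem.Int.band (PySem.Int.bxor ((pvS secret i) <<< (6:Nat)) (pvS secret i)) 16777215) >>> (5:Nat))
          (PySem.Int.band (PySem.Int.bxor ((pvS secret i) <<< (6:Nat)) (pvS secret i)) 16777215))) 16777215
        = pvS secret (i+1) := rfl
    simp only [hstep]
    rw [ih (i+1), List.range_succ_eq_map]
    simp only [List.map_cons, List.map_map, List.append_assoc, List.singleton_append]
    congr 2
    · simp [pvP]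
      intro a _
      have : i + 1 + 1 + a = i + 1 + (a + 1) := by omega
      rw [this]


theorem pvPrices_eq (secret : Int) (m : Nat) :
    pvBuildPricesB secret [PySem.Int.mod secret 10] m = (List.range (m + 1)).map (pvP secret) := by
  have h := pvBuildPricesB_spec secret m 0 [PySem.Int.mod secret 10]
  rw [show pvS secret 0 = secret from rfl] at h
  rw [h, List.range_succ_eq_map]
  simp only [List.map_cons, List.map_map, List.singleton_append]
  congr 1
  apply List.map_congr_left; intro j _
  show pvP secret (0 + 1 + j) = pvP secret (j+1)
  congr 1; omega


theorem pvDeltas_eq (secret : Int) (m : Nat) :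
    List.zipWith (fun a b => b - a) ((List.range (m + 1)).map (pvP secret))
        (PySem.List.slice ((List.range (m + 1)).map (pvP secret)) (some 1) none)
      = (List.range m).map (pvD secret) := by
  rw [PySem.List.slice_from_one]
  apply List.ext_getElem
  · simp
  · intro j h1 h2
    simp only [List.getElem_zipWith, List.getElem_tail, List.getElem_map, List.getElem_range] at *
    simp [pvD]


theorem pvBfold (secret : Int) (m : Nat) : ∀ (k i : Nat) (d : List (Int × Int × Int × Int × Int)),
    3 ≤ i → i + k = m →
    (PySem.List.pyRange (i : Int) (m : Int) 1).foldl
      (fun res j =>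
        pvSetdefaultB res
          (PySem.List.pyGetD ((List.range m).map (pvD secret)) j 0,
           PySem.List.pyGetD ((List.range m).map (pvD secret)) (j - 1) 0,
           PySem.List.pyGetD ((List.range m).map (pvD secret)) (j - 2) 0,
           PySem.List.pyGetD ((List.range m).map (pvD secret)) (j - 3) 0)
          (PySem.List.pyGetD ((List.range (m + 1)).map (pvP secret)) (j + 1) 0)) d
      = pvFoldIns secret d i k := by
  intro k
  induction k with
  | zero =>
    intro i d hi him
    rw [PySem.List.pyRange_one_eq_nil (by omega : (m:Int) ≤ (i:Int))]
    simp [pvFoldIns]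
  | succ k ih =>
    intro i d hi him
    rw [PySem.List.pyRange_one_cons (by exact_mod_cast (by omega : (i:Int) < (m:Int)))]
    rw [List.foldl_cons]
    have g1 : PySem.List.pyGetD ((List.range m).map (pvD secret)) (i : Int) 0 = pvD secret i := by
      rw [PySem.List.pyGetD_natCast]
      rw [List.getD_eq_getElem?_getD]
      simp [List.getElem?_map, List.getElem?_range (show i < m by omega)]
    have c1 : ((i : Int) - 1) = ((i - 1 : Nat) : Int) := by omega
    have c2 : ((i : Int) - 2) = ((i - 2 : Nat) : Int) := by omega
    have c3 : ((i : Int) - 3) = ((i - 3 : Nat) : Int) := by omega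
    have c4 : ((i : Int) + 1) = ((i + 1 : Nat) : Int) := by omega
    have g2 : PySem.List.pyGetD ((List.range m).map (pvD secret)) ((i:Int) - 1) 0 = pvD secret (i - 1) := by
      rw [c1, PySem.List.pyGetD_natCast, List.getD_eq_getElem?_getD]
      simp [List.getElem?_map, List.getElem?_range (show i - 1 < m by omega)]
    have g3 : PySem.List.pyGetD ((List.range m).map (pvD secret)) ((i:Int) - 2) 0 = pvD secret (i - 2) := by
      rw [c2, PySem.List.pyGetD_natCast, List.getD_eq_getElem?_getD]
      simp [List.getElem?_map, List.getElem?_range (show i - 2 < m by omega)]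
    have g4 : PySem.List.pyGetD ((List.range m).map (pvD secret)) ((i:Int) - 3) 0 = pvD secret (i - 3) := by
      rw [c3, PySem.List.pyGetD_natCast, List.getD_eq_getElem?_getD]
      simp [List.getElem?_map, List.getElem?_range (show i - 3 < m by omega)]
    have g5 : PySem.List.pyGetD ((List.range (m+1)).map (pvP secret)) ((i:Int) + 1) 0 = pvP secret (i + 1) := by
      rw [c4, PySem.List.pyGetD_natCast, List.getD_eq_getElem?_getD]
      simp [List.getElem?_map, List.getElem?_range (show i + 1 < m + 1 by omega)]
    rw [pvFoldIns]
    have : ((i : Int) + 1) = ((i + 1 : Nat) : Int) := by omega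
    rw [g1, g2, g3, g4, g5, this, ih (i+1) _ (by omega) (by omega)]


-- ===== VERDICT (by name: the statement is the Claim_ definition above) =====
theorem evolve_get_bananas_spec : Claim_equal_evolve_get_bananas := by
  intro secret n _hdom
  show evolve_get_bananas secret n = evolve_get_bananas_alt secret n
  simp only [evolve_get_bananas, evolve_get_bananas_alt]
  rw [pvPrices_eq secret n.toNat, pvDeltas_eq secret n.toNat]
  rw [PySem.List.len_eq]
  simp only [List.length_map, List.length_range]
  rcases Nat.lt_or_ge n.toNat 3 with hm | hm
  · rw [PySem.List.pyRange_one_eq_nil (by exact_mod_cast (by omega : (n.toNat : Int) ≤ 3))]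
    rw [List.foldl_nil, pvLoopA_small secret n.toNat (by omega)]
  · obtain ⟨k, hk⟩ : ∃ k, n.toNat = k + 3 := ⟨n.toNat - 3, by omega⟩
    rw [hk, pvLoopA_first3 secret k]
    have hA := pvLoopA_inv secret k 3 [] (by omega)
    norm_num at hA
    rw [hA]
    have hB := pvBfold secret (k + 3) k 3 [] (by omega) (by omega)
    rw [show ((3:Nat) : Int) = (3 : Int) from rfl] at hB
    rw [hB]
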